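-- pv_equiv track=rewrite | github.com/CaseyAllen/hexful | main.py | trimLine
-- ===== SOURCE A (Python) =====
-- def trimLine(line: str) -> str:
--     line = line.strip()
--     if not line or line.isspace():
--         return None
--     elif line.startswith("@"):
--         # Embedded Instructions, i.e repeat
--         return line
--     goodText = ""
--     isSubBlock = False
--     for char in line:
--         if char == "#":
--             # comments
--             break
--         if char == "/":
--             isSubBlock = not isSubBlock
--         elif char.isspace():
--             if not isSubBlock:
--                 continue
--         goodText += char
--     return goodText
-- ===== SOURCE B (Python) =====
-- def trimLine(line: str) -> str:
--     line = line.strip()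
--     if not line or line.isspace():
--         return None
--     if line.startswith("@"):
--         return line
--     code = line.split("#", 1)[0]
--     segments = code.split("/")
--     processed = [seg if i % 2 else "".join(c for c in seg if not c.isspace())
--                  for i, seg in enumerate(segments)]
--     return "/".join(processed)
-- ===== Notes on version B (the rewrite author's own statement) =====
-- stated objective: alternative
-- what changed: Replaces A's stateful char-by-char loop (break on '#', isSubBlock toggle) by stripping the comment with split('#',1)[0], splitting on '/', filtering whitespace only from even-indexed segments, and rejoining with '/'.
import Mathlib
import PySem

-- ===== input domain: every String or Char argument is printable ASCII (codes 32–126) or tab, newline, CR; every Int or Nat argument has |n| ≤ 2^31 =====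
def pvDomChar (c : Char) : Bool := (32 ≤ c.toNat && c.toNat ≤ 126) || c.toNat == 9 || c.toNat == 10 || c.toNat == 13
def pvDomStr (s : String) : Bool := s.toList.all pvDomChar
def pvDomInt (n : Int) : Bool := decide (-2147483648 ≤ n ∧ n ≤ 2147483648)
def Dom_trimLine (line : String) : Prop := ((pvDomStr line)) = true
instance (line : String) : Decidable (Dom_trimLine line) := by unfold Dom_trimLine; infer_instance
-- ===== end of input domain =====

-- B replaces A's stateful char-by-char automaton by strip-comment, split on '/', per-segment
-- whitespace filtering on even segments, and a '/'-join (alternative decomposition, same cost).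


-- ===== PORT A =====
-- the for-loop of A: '#' breaks, '/' toggles isSubBlock (and is appended), whitespace is
-- skipped outside a sub-block; everything else is appended
def trimLoopA : List Char → Bool → List Char
  | [], _ => []
  | c :: rest, sub =>
    if c == '#' then []
    else if c == '/' then c :: trimLoopA rest (!sub)
    else if PySem.Chars.isspace c then
      (if !sub then trimLoopA rest sub else c :: trimLoopA rest sub)
    else c :: trimLoopA rest sub

def trimLine (line : String) : Option String :=
  let line := PySem.Str.strip line
  if PySem.Str.len line == 0 || PySem.Str.strIsspace line then none
  else if PySem.Str.startswith line "@" then some line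
  else some (String.mk (trimLoopA line.toList false))

-- ===== PORT B =====
-- the even/odd segment processor of Source B's list comprehension
def segB (p : Int × List Char) : List Char :=
  if PySem.Int.mod p.1 2 != 0 then p.2
  else p.2.filter (fun c => !PySem.Chars.isspace c)

def trimLine_alt (line : String) : Option String :=
  let line := PySem.Str.strip line
  if PySem.Str.len line == 0 || PySem.Str.strIsspace line then none
  else if PySem.Str.startswith line "@" then some line
  else
    -- line.split('#', 1)[0] = the prefix before the first '#' (exact: single-char separator)
    let code := line.toList.takeWhile (fun c => !(c == '#'))
    let segments := code.splitOn '/'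
    let processed := (PySem.List.enumerate segments).map segB
    some (String.mk (PySem.Chars.join ['/'] processed))

-- ===== PRECONDITION & SPEC =====
def Spec_trimLine (line : String) (out : Option String) : Prop := out = trimLine_alt line
instance (line : String) (out : Option String) : Decidable (Spec_trimLine line out) := by unfold Spec_trimLine; infer_instance

-- ===== CLAIM (what is proved, stated in full; the proofs are below) =====
def Claim_equal_trimLine : Prop := ∀ (line : String), Dom_trimLine line → Spec_trimLine line (trimLine line)

-- ===== LEMMAS AND PROOFS =====

-- A's loop without the '#' break (the break = restricting to the prefix before the first '#')
def trimNoHash : List Char → Bool → List Char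
  | [], _ => []
  | c :: rest, sub =>
    if c == '/' then c :: trimNoHash rest (!sub)
    else if PySem.Chars.isspace c then
      (if !sub then trimNoHash rest sub else c :: trimNoHash rest sub)
    else c :: trimNoHash rest sub

lemma trimLoopA_eq_trimNoHash (cs : List Char) (sub : Bool) :
    trimLoopA cs sub = trimNoHash (cs.takeWhile (fun c => !(c == '#'))) sub := by
  induction cs generalizing sub with
  | nil => rfl
  | cons c rest ih =>
    by_cases h : c = '#'
    · subst h
      simp [trimLoopA, List.takeWhile_cons, trimNoHash]
    · have ht : List.takeWhile (fun c => !(c == '#')) (c :: rest)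
          = c :: List.takeWhile (fun c => !(c == '#')) rest := by
        simp [List.takeWhile_cons, h]
      rw [ht]
      show (if c == '#' then [] else if c == '/' then c :: trimLoopA rest (!sub)
            else if PySem.Chars.isspace c then
              (if !sub then trimLoopA rest sub else c :: trimLoopA rest sub)
            else c :: trimLoopA rest sub) = _
      rw [if_neg (by simp [h])]
      show _ = (if c == '/' then c :: trimNoHash (List.takeWhile (fun c => !(c == '#')) rest) (!sub)
            else if PySem.Chars.isspace c then
              (if !sub then trimNoHash (List.takeWhile (fun c => !(c == '#')) rest) sub
               else c :: trimNoHash (List.takeWhile (fun c => !(c == '#')) rest) sub)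
            else c :: trimNoHash (List.takeWhile (fun c => !(c == '#')) rest) sub)
      split_ifs <;> simp [ih]

lemma segB_odd (k : Int) (h : PySem.Int.mod k 2 ≠ 0) (s : List Char) : segB (k, s) = s := by
  unfold segB
  rw [if_pos (by simpa using h)]

lemma segB_even (k : Int) (h : PySem.Int.mod k 2 = 0) (s : List Char) :
    segB (k, s) = s.filter (fun c => !PySem.Chars.isspace c) := by
  unfold segB
  rw [if_neg (by simpa using h)]

lemma mod2_eq (k : Int) : PySem.Int.mod k 2 = k % 2 := by
  unfold PySem.Int.mod; rw [Int.fmod_eq_emod]; norm_num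

lemma mod2_flip (k : Int) :
    (PySem.Int.mod (k + 1) 2 != 0) = !(PySem.Int.mod k 2 != 0) := by
  rw [mod2_eq, mod2_eq]
  have h : k % 2 = 0 ∨ k % 2 = 1 := by omega
  rcases h with h | h
  · have h1 : (k + 1) % 2 = 1 := by omega
    simp [h, h1]
  · have h1 : (k + 1) % 2 = 0 := by omega
    simp [h, h1]

lemma main_lemma (cs : List Char) (k : Int) :
    trimNoHash cs (PySem.Int.mod k 2 != 0)
      = PySem.Chars.join ['/'] ((PySem.List.enumerate (cs.splitOn '/') k).map segB) := by
  induction cs generalizing k with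
  | nil =>
    have h0 : (([] : List Char).splitOn '/') = [[]] := rfl
    rw [h0]
    have h1 : segB (k, ([] : List Char)) = [] := by
      unfold segB; split <;> rfl
    simp only [PySem.List.enumerate, List.map_cons, List.map_nil, h1]
    rfl
  | cons c rest ih =>
    have hne : rest.splitOn '/' ≠ [] := by
      unfold List.splitOn; exact List.splitOnP_ne_nil _ _
    obtain ⟨h, t, hht⟩ := List.exists_cons_of_ne_nil hne
    by_cases hc : c = '/'
    · subst hc
      have hs : (('/' : Char) :: rest).splitOn '/' = [] :: rest.splitOn '/' := by
        unfold List.splitOn; rw [List.splitOnP_cons]; simp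
      rw [hs, hht]
      simp only [PySem.List.enumerate, List.map_cons]
      have hA : trimNoHash ('/' :: rest) (PySem.Int.mod k 2 != 0)
          = '/' :: trimNoHash rest (!(PySem.Int.mod k 2 != 0)) := by
        simp [trimNoHash]
      rw [hA, ← mod2_flip, ih (k + 1), hht]
      simp only [PySem.List.enumerate, List.map_cons]
      have h1 : segB (k, ([] : List Char)) = [] := by
        unfold segB; split <;> rfl
      rw [h1]
      simp [PySem.Chars.join, List.intercalate]
    · have hsplit : (c :: rest).splitOn '/' = (c :: h) :: t := by
        unfold List.splitOn
        rw [List.splitOnP_cons, if_neg (by simp [hc])]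
        unfold List.splitOn at hht
        rw [hht]
        rfl
      rw [hsplit]
      simp only [PySem.List.enumerate, List.map_cons]
      have hrest := ih k
      rw [hht] at hrest
      simp only [PySem.List.enumerate, List.map_cons] at hrest
      by_cases h0 : PySem.Int.mod k 2 = 0
      · -- even segment: whitespace dropped on both sides
        rw [segB_even _ h0] at *
        have hs0 : (PySem.Int.mod k 2 != 0) = false := by simpa using h0
        by_cases hsp : PySem.Chars.isspace c = true
        · have hA : trimNoHash (c :: rest) (PySem.Int.mod k 2 != 0) =
              trimNoHash rest (PySem.Int.mod k 2 != 0) := by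
            rw [hs0]; simp [trimNoHash, hc, hsp]
          rw [hA, hrest]
          simp [List.filter, hsp]
        · have hA : trimNoHash (c :: rest) (PySem.Int.mod k 2 != 0) =
              c :: trimNoHash rest (PySem.Int.mod k 2 != 0) := by
            rw [hs0]; simp [trimNoHash, hc, hsp]
          rw [hA, hrest]
          have hf : (PySem.Chars.isspace c) = false := by simpa using hsp
          cases t with
          | nil => simp [PySem.Chars.join, List.intercalate, List.filter, hf]
          | cons t0 ts => simp [PySem.Chars.join, List.intercalate, List.filter, hf]
      · -- odd segment: kept verbatim on both sides
        rw [segB_odd _ h0] at *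
        have hA : trimNoHash (c :: rest) (PySem.Int.mod k 2 != 0) =
            c :: trimNoHash rest (PySem.Int.mod k 2 != 0) := by
          have h1 : (PySem.Int.mod k 2 != 0) = true := by simpa using h0
          rw [h1]
          by_cases hsp : PySem.Chars.isspace c = true <;>
            simp [trimNoHash, hc, hsp]
        rw [hA, hrest]
        cases t with
        | nil => simp [PySem.Chars.join, List.intercalate]
        | cons t0 ts => simp [PySem.Chars.join, List.intercalate]

lemma body_eq (cs : List Char) :
    trimLoopA cs false
      = PySem.Chars.join ['/']
          ((PySem.List.enumerate ((cs.takeWhile (fun c => !(c == '#'))).splitOn '/') 0).map segB) := by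
  rw [trimLoopA_eq_trimNoHash]
  have h := main_lemma (cs.takeWhile (fun c => !(c == '#'))) 0
  have h0 : (PySem.Int.mod (0 : Int) 2 != 0) = false := by decide
  rw [h0] at h
  exact h

-- ===== VERDICT (by name: the statement is the Claim_ definition above) =====
theorem trimLine_spec : Claim_equal_trimLine := by
  intro line _
  unfold Spec_trimLine trimLine trimLine_alt
  simp only []
  split_ifs with h1 h2
  · rfl
  · rfl
  · rw [body_eq]
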